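-- pv_equiv track=rewrite | github.com/kstodolak/advent-of-code | 2023/day23/solve.py | find_graph_nodes
-- ===== SOURCE A (Python) =====
-- DIRECTIONS = [(0, 1), (0, -1), (1, 0), (-1, 0)]
--
-- def find_graph_nodes(M):
--   nodes = []
--   for y, row in enumerate(M):
--     for x, c in enumerate(row):
--       if c == "#":
--         continue
--
--       n_count = 0
--       for dy, dx in DIRECTIONS:
--         ny = y + dy
--         nx = x + dx
--         if ny in range(len(M)) and nx in range(len(M[0])):
--           cc = M[ny][nx]
--           if cc != "#":
--             n_count += 1
--
--       if n_count > 2: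
--         nodes.append((y, x))
--   return nodes
-- ===== SOURCE B (Python) =====
-- def find_graph_nodes(M):
--     H = len(M)
--     W = len(M[0]) if M else 0
--     # first pass: degree table; each open adjacency (right / down) scanned once,
--     # crediting both endpoints
--     deg = {}
--     for y in range(H):
--         row = M[y]
--         for x in range(min(len(row), W)):
--             if row[x] == "#":
--                 continue
--             if x + 1 < W and x + 1 < len(row) and row[x + 1] != "#":
--                 deg[y, x] = deg.get((y, x), 0) + 1
--                 deg[y, x + 1] = deg.get((y, x + 1), 0) + 1
--             if y + 1 < H and x < len(M[y + 1]) and M[y + 1][x] != "#":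
--                 deg[y, x] = deg.get((y, x), 0) + 1
--                 deg[y + 1, x] = deg.get((y + 1, x), 0) + 1
--     # second pass: emit, in row-major order, the open cells of degree > 2
--     nodes = []
--     for y in range(H):
--         row = M[y]
--         for x in range(min(len(row), W)):
--             if row[x] != "#" and deg.get((y, x), 0) > 2:
--                 nodes.append((y, x))
--     return nodes
-- ===== Notes on version B (the rewrite author's own statement) =====
-- stated objective: alternative
-- what changed: Replaces A's per-cell scan of all four neighbours with a two-stage algorithm: a first pass builds a degree dictionary by visiting each right/down adjacency once and crediting both endpoints, then a second row-major pass emits the open cells whose tabulated degree exceeds 2.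
import Mathlib
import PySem

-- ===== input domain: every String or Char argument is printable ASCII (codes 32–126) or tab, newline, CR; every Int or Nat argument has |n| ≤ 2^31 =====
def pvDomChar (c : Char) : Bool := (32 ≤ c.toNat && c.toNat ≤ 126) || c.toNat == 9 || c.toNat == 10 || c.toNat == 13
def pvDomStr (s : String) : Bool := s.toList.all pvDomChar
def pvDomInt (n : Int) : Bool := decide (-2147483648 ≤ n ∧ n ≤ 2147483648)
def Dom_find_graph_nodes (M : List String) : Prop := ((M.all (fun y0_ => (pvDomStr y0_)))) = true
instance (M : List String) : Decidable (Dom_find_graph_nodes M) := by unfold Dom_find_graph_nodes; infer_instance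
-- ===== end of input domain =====

-- B replaces A's per-cell four-neighbour scan by two staged passes: a degree dictionary built by
-- visiting each right/down adjacency once (crediting both endpoints), then a row-major emission pass
-- (objective: alternative decomposition, same asymptotic cost).

-- ===== PORT A =====
def DIRECTIONS : List (Int × Int) := [(0, 1), (0, -1), (1, 0), (-1, 0)]

-- the 'for dy, dx in DIRECTIONS' loop computing n_count at cell (yi, xi), factored as a helper;
-- the '#' / "" defaults of the lookups are never used on inputs satisfying Pre_ (Python raises there)
def cntA (M : List String) (yi xi : Int) : Int :=
  DIRECTIONS.foldl (fun n d =>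
    let ny := yi + d.1
    let nx := xi + d.2
    if (0 ≤ ny ∧ ny < (M.length : Int)) ∧ (0 ≤ nx ∧ nx < ((M.headD "").toList.length : Int)) then
      if PySem.List.pyGetD (PySem.List.pyGetD M ny "").toList nx '#' ≠ '#' then n + 1 else n
    else n) 0

def find_graph_nodes (M : List String) : List (Int × Int) :=
  (PySem.List.enumerate M).foldl (fun nodes yrow =>
    (PySem.List.enumerate yrow.2.toList).foldl (fun nodes xc =>
      if xc.2 = '#' then nodes
      else
        let n_count := cntA M yrow.1 xc.1
        if n_count > 2 then nodes ++ [(yrow.1, xc.1)] else nodes) nodes) []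

-- ===== PORT B =====
-- Python's 'deg[k] = deg.get(k, 0) + 1'
def incr (d : PySem.Dict (Int × Int) Int) (k : Int × Int) : PySem.Dict (Int × Int) Int :=
  d.insert k (d.getD k 0 + 1)

-- the body of B's first-pass inner loop at cell (y, x)
def degStep (M : List String) (H W : Nat) (d : PySem.Dict (Int × Int) Int) (y x : Nat) :
    PySem.Dict (Int × Int) Int :=
  let row := (M.getD y "").toList
  if row.getD x '#' = '#' then d
  else
    let d := if x + 1 < W ∧ x + 1 < row.length ∧ row.getD (x + 1) '#' ≠ '#' then
        incr (incr d ((y : Int), (x : Int))) ((y : Int), (x : Int) + 1) else d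
    if y + 1 < H ∧ x < (M.getD (y + 1) "").toList.length ∧ (M.getD (y + 1) "").toList.getD x '#' ≠ '#' then
        incr (incr d ((y : Int), (x : Int))) ((y : Int) + 1, (x : Int)) else d

-- B's first pass: the degree table
def degDict (M : List String) : PySem.Dict (Int × Int) Int :=
  let H := M.length
  let W := if M = [] then 0 else (M.headD "").toList.length
  (List.range H).foldl (fun d y =>
    (List.range (min (M.getD y "").toList.length W)).foldl
      (fun d x => degStep M H W d y x) d) PySem.Dict.empty

def find_graph_nodes_alt (M : List String) : List (Int × Int) :=
  let H := M.length
  let W := if M = [] then 0 else (M.headD "").toList.length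
  let deg := degDict M
  (List.range H).foldl (fun nodes y =>
    let row := (M.getD y "").toList
    (List.range (min row.length W)).foldl (fun nodes x =>
      if row.getD x '#' ≠ '#' ∧ deg.getD ((y : Int), (x : Int)) 0 > 2 then
        nodes ++ [((y : Int), (x : Int))] else nodes) nodes) []

-- ===== PRECONDITION & SPEC =====
-- Pre_ excludes exactly the ragged grids on which A raises IndexError: a non-wall cell probing a
-- neighbour whose column index passes the 'nx in range(len(M[0]))' test but exceeds that row's length.
def Pre_find_graph_nodes (M : List String) : Prop :=
  ∀ y ∈ List.range M.length, ∀ x ∈ List.range (M.getD y "").toList.length,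
    (M.getD y "").toList.getD x '#' ≠ '#' →
      (x + 1 < (M.headD "").toList.length → x + 1 < (M.getD y "").toList.length) ∧
      (y + 1 < M.length → x < (M.headD "").toList.length → x < (M.getD (y + 1) "").toList.length) ∧
      (0 < y → x < (M.headD "").toList.length → x < (M.getD (y - 1) "").toList.length)

instance (M : List String) : Decidable (Pre_find_graph_nodes M) := by
  unfold Pre_find_graph_nodes; infer_instance

def pvWitness_find_graph_nodes : List String := ["#.#", "...", "#.#"]

def Spec_find_graph_nodes (M : List String) (out : List (Int × Int)) : Prop := out = find_graph_nodes_alt M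
instance (M : List String) (out : List (Int × Int)) : Decidable (Spec_find_graph_nodes M out) := by unfold Spec_find_graph_nodes; infer_instance

-- ===== CLAIM (what is proved, stated in full; the proofs are below) =====
def Claim_equal_find_graph_nodes : Prop := ∀ (M : List String), Dom_find_graph_nodes M → Pre_find_graph_nodes M → Spec_find_graph_nodes M (find_graph_nodes M)

-- ===== LEMMAS AND PROOFS =====

-- row y of the grid as characters, and the width cap len(M[0])
def rowC (M : List String) (y : Nat) : List Char := (M.getD y "").toList
def gW (M : List String) : Nat := (M.headD "").toList.length

theorem W_eq (M : List String) : (if M = [] then 0 else (M.headD "").toList.length) = gW M := by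
  cases M <;> simp [gW]

-- ---------- characterising B's degree dictionary ----------

-- the total contribution of B's scan of cell (y, x) to the degree of key k
def contrib (M : List String) (k : Int × Int) (y x : Nat) : Int :=
  if (M.getD y "").toList.getD x '#' = '#' then 0
  else
    (if x + 1 < gW M ∧ x + 1 < (M.getD y "").toList.length ∧ (M.getD y "").toList.getD (x + 1) '#' ≠ '#' then
      (if k = ((y : Int), (x : Int)) then 1 else 0) + (if k = ((y : Int), (x : Int) + 1) then 1 else 0) else 0)
    + (if y + 1 < M.length ∧ x < (M.getD (y + 1) "").toList.length ∧ (M.getD (y + 1) "").toList.getD x '#' ≠ '#' then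
      (if k = ((y : Int), (x : Int)) then 1 else 0) + (if k = ((y : Int) + 1, (x : Int)) then 1 else 0) else 0)

def rowSum (M : List String) (k : Int × Int) (y : Nat) : Int :=
  ((List.range (min (M.getD y "").toList.length (gW M))).map (contrib M k y)).sum

theorem getD_incr (d : PySem.Dict (Int × Int) Int) (a k : Int × Int) :
    (incr d a).getD k 0 = d.getD k 0 + (if k = a then 1 else 0) := by
  unfold incr
  rw [PySem.Dict.getD_insert]
  split_ifs with h
  · subst h; ring
  · ring

theorem getD_degStep (M : List String) (d : PySem.Dict (Int × Int) Int) (y x : Nat) (k : Int × Int) :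
    (degStep M M.length (gW M) d y x).getD k 0 = d.getD k 0 + contrib M k y x := by
  simp only [degStep, contrib]
  split_ifs <;> (try simp only [getD_incr]) <;> first | (split_ifs <;> ring1) | ring1

theorem getD_foldl_row (M : List String) (y : Nat) (k : Int × Int) (n : Nat)
    (d : PySem.Dict (Int × Int) Int) :
    ((List.range n).foldl (fun d x => degStep M M.length (gW M) d y x) d).getD k 0
      = d.getD k 0 + ((List.range n).map (contrib M k y)).sum := by
  induction n generalizing d with
  | zero => simp
  | succ n ih =>
    rw [List.range_succ, List.foldl_append, List.map_append, List.sum_append]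
    simp only [List.foldl_cons, List.foldl_nil, List.map_cons, List.map_nil, List.sum_cons,
      List.sum_nil, add_zero]
    rw [getD_degStep, ih]
    ring

theorem getD_foldl_rows (M : List String) (k : Int × Int) (n : Nat) :
    ((List.range n).foldl (fun d y =>
        (List.range (min (M.getD y "").toList.length (gW M))).foldl
          (fun d x => degStep M M.length (gW M) d y x) d) PySem.Dict.empty).getD k 0
      = ((List.range n).map (rowSum M k)).sum := by
  induction n with
  | zero => simp
  | succ n ih =>
    rw [List.range_succ, List.foldl_append, List.map_append, List.sum_append]
    simp only [List.foldl_cons, List.foldl_nil, List.map_cons, List.map_nil, List.sum_cons,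
      List.sum_nil, add_zero]
    rw [getD_foldl_row, ih, rowSum]

theorem getD_degDict (M : List String) (k : Int × Int) :
    (degDict M).getD k 0 = ((List.range M.length).map (rowSum M k)).sum := by
  simp only [degDict, W_eq]
  exact getD_foldl_rows M k M.length

-- ---------- where contrib is nonzero, and its values there ----------

theorem contrib_zero (M : List String) (y x y' x' : Nat)
    (h1 : ¬ (y' = y ∧ (x' = x ∨ x' + 1 = x))) (h2 : ¬ (y' + 1 = y ∧ x' = x)) :
    contrib M ((y : Int), (x : Int)) y' x' = 0 := by
  simp only [contrib, Prod.mk.injEq]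
  split_ifs <;> omega

theorem contrib_self (M : List String) (y x : Nat)
    (hopen : (M.getD y "").toList.getD x '#' ≠ '#') :
    contrib M ((y : Int), (x : Int)) y x
      = (if x + 1 < gW M ∧ x + 1 < (M.getD y "").toList.length ∧ (M.getD y "").toList.getD (x + 1) '#' ≠ '#' then 1 else 0)
      + (if y + 1 < M.length ∧ x < (M.getD (y + 1) "").toList.length ∧ (M.getD (y + 1) "").toList.getD x '#' ≠ '#' then 1 else 0) := by
  simp only [contrib, Prod.mk.injEq]
  rw [if_neg hopen]
  push_cast
  simp only [true_and]
  split_ifs <;> omega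

theorem contrib_left (M : List String) (y x x' : Nat) (hx1 : x' + 1 = x)
    (hxW : x < gW M) (hxlen : x < (M.getD y "").toList.length)
    (hopen : (M.getD y "").toList.getD x '#' ≠ '#') :
    contrib M ((y : Int), (x : Int)) y x'
      = if (M.getD y "").toList.getD x' '#' = '#' then 0 else 1 := by
  subst hx1
  simp only [contrib, Prod.mk.injEq]
  by_cases h0 : (M.getD y "").toList.getD x' '#' = '#'
  · rw [if_pos h0, if_pos h0]
  · rw [if_neg h0, if_neg h0, if_pos ⟨hxW, hxlen, hopen⟩]
    push_cast
    simp only [true_and]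
    split_ifs <;> omega

theorem contrib_up (M : List String) (y x y' : Nat) (hy1 : y' + 1 = y)
    (hy : y < M.length) (hxlen : x < (M.getD y "").toList.length)
    (hopen : (M.getD y "").toList.getD x '#' ≠ '#') :
    contrib M ((y : Int), (x : Int)) y' x
      = if (M.getD y' "").toList.getD x '#' = '#' then 0 else 1 := by
  subst hy1
  simp only [contrib, Prod.mk.injEq]
  by_cases h0 : (M.getD y' "").toList.getD x '#' = '#'
  · rw [if_pos h0, if_pos h0]
  · have hd : y' + 1 < M.length ∧ x < (M.getD (y' + 1) "").toList.length ∧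
        (M.getD (y' + 1) "").toList.getD x '#' ≠ '#' := ⟨hy, hxlen, hopen⟩
    rw [if_neg h0, if_neg h0, if_pos hd]
    push_cast
    simp only [true_and]
    split_ifs <;> omega

-- ---------- a sum over range with support in at most two points ----------

theorem sum_two_support (f : Nat → Int) (a b : Nat) (hf : ∀ x, x ≠ a → x ≠ b → f x = 0)
    (n : Nat) :
    ((List.range n).map f).sum
      = (if a < n then f a else 0) + (if b < n ∧ b ≠ a then f b else 0) := by
  induction n with
  | zero => simp
  | succ n ih =>
    rw [List.range_succ, List.map_append, List.sum_append, ih]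
    simp only [List.map_cons, List.map_nil, List.sum_cons, List.sum_nil, add_zero]
    by_cases ha : n = a
    · subst ha; split_ifs <;> first | ring1 | (exfalso; omega)
    · by_cases hb : n = b
      · subst hb; split_ifs <;> first | ring1 | (exfalso; omega)
      · rw [hf n ha hb]; split_ifs <;> first | ring1 | (exfalso; omega)

-- ---------- characterising A's neighbour count ----------

-- one addend of A's n_count loop: the contribution of direction (dy, dx) at cell (yi, xi)
def aT (M : List String) (yi xi dy dx : Int) : Int :=
  if (0 ≤ yi + dy ∧ yi + dy < (M.length : Int)) ∧ (0 ≤ xi + dx ∧ xi + dx < ((M.headD "").toList.length : Int)) then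
    if PySem.List.pyGetD (PySem.List.pyGetD M (yi + dy) "").toList (xi + dx) '#' ≠ '#' then 1 else 0
  else 0

set_option maxHeartbeats 1000000 in
theorem cntA_eq_sum (M : List String) (yi xi : Int) :
    cntA M yi xi = aT M yi xi 0 1 + aT M yi xi 0 (-1) + aT M yi xi 1 0 + aT M yi xi (-1) 0 := by
  simp only [cntA, DIRECTIONS, List.foldl_cons, List.foldl_nil, aT]
  split_ifs <;> omega

theorem aT_le_one (M : List String) (yi xi dy dx : Int) : aT M yi xi dy dx ≤ 1 := by
  unfold aT; split_ifs <;> omega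

theorem preApply (M : List String) (hP : Pre_find_graph_nodes M) (y x : Nat)
    (hy : y < M.length) (hx : x < (M.getD y "").toList.length)
    (hopen : (M.getD y "").toList.getD x '#' ≠ '#') :
    (x + 1 < gW M → x + 1 < (M.getD y "").toList.length) ∧
    (y + 1 < M.length → x < gW M → x < (M.getD (y + 1) "").toList.length) ∧
    (0 < y → x < gW M → x < (M.getD (y - 1) "").toList.length) := by
  have := hP y (List.mem_range.mpr hy) x (List.mem_range.mpr hx) hopen
  simpa [gW] using this

theorem aT_right (M : List String) (y x : Nat)
    (hp1 : x + 1 < gW M → x + 1 < (M.getD y "").toList.length) (hy : y < M.length) :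
    aT M (y : Int) (x : Int) 0 1
      = if x + 1 < gW M ∧ x + 1 < (M.getD y "").toList.length ∧ (M.getD y "").toList.getD (x + 1) '#' ≠ '#'
        then 1 else 0 := by
  simp only [aT]
  have e1 : (y : Int) + 0 = ((y : Nat) : Int) := by ring
  have e2 : (x : Int) + 1 = (((x + 1 : Nat)) : Int) := by push_cast; ring
  rw [e1, e2, PySem.List.pyGetD_natCast, PySem.List.pyGetD_natCast]
  by_cases hw : x + 1 < gW M
  · have hw' : x + 1 < (M.headD "").toList.length := by simpa [gW] using hw
    have hx1 := hp1 hw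
    rw [if_pos ⟨⟨by omega, by omega⟩, by omega, by omega⟩]
    by_cases hch : (M.getD y "").toList.getD (x + 1) '#' = '#'
    · rw [if_neg (not_not_intro hch), if_neg (fun h => h.2.2 hch)]
    · rw [if_pos hch, if_pos ⟨hw, hx1, hch⟩]
  · have hw' : ¬ x + 1 < (M.headD "").toList.length := by simpa [gW] using hw
    rw [if_neg (fun h => hw' (by omega)), if_neg (fun h => hw h.1)]

theorem aT_down (M : List String) (y x : Nat)
    (hp2 : y + 1 < M.length → x < (M.getD (y + 1) "").toList.length)
    (hy : y < M.length) (hxW : x < gW M) :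
    aT M (y : Int) (x : Int) 1 0
      = if y + 1 < M.length ∧ x < (M.getD (y + 1) "").toList.length ∧ (M.getD (y + 1) "").toList.getD x '#' ≠ '#'
        then 1 else 0 := by
  simp only [aT]
  have e1 : (y : Int) + 1 = (((y + 1 : Nat)) : Int) := by push_cast; ring
  have e2 : (x : Int) + 0 = ((x : Nat) : Int) := by ring
  rw [e1, e2, PySem.List.pyGetD_natCast, PySem.List.pyGetD_natCast]
  have hwx : x < (M.headD "").toList.length := by simpa [gW] using hxW
  by_cases hd : y + 1 < M.length
  · have hx1 := hp2 hd
    rw [if_pos ⟨⟨by omega, by omega⟩, by omega, by omega⟩]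
    by_cases hch : (M.getD (y + 1) "").toList.getD x '#' = '#'
    · rw [if_neg (not_not_intro hch), if_neg (fun h => h.2.2 hch)]
    · rw [if_pos hch, if_pos ⟨hd, hx1, hch⟩]
  · rw [if_neg (fun h => hd (by omega)), if_neg (fun h => hd h.1)]

theorem aT_left (M : List String) (y x : Nat)
    (hy : y < M.length) (hxW : x < gW M) :
    aT M (y : Int) (x : Int) 0 (-1)
      = if 0 < x then (if (M.getD y "").toList.getD (x - 1) '#' = '#' then 0 else 1) else 0 := by
  simp only [aT]
  have e1 : (y : Int) + 0 = ((y : Nat) : Int) := by ring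
  have hwx : x < (M.headD "").toList.length := by simpa [gW] using hxW
  rw [e1, PySem.List.pyGetD_natCast]
  by_cases h0 : 0 < x
  · have e2 : (x : Int) + (-1) = (((x - 1 : Nat)) : Int) := by omega
    rw [e2, PySem.List.pyGetD_natCast]
    rw [if_pos ⟨⟨by omega, by omega⟩, by omega, by omega⟩, if_pos h0]
    by_cases hch : (M.getD y "").toList.getD (x - 1) '#' = '#'
    · rw [if_neg (not_not_intro hch), if_pos hch]
    · rw [if_pos hch, if_neg hch]
  · rw [if_neg (fun h => h0 (by omega)), if_neg h0]

theorem aT_up (M : List String) (y x : Nat)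
    (hp3 : 0 < y → x < (M.getD (y - 1) "").toList.length)
    (hy : y < M.length) (hxW : x < gW M) :
    aT M (y : Int) (x : Int) (-1) 0
      = if 0 < y then (if (M.getD (y - 1) "").toList.getD x '#' = '#' then 0 else 1) else 0 := by
  simp only [aT]
  have e2 : (x : Int) + 0 = ((x : Nat) : Int) := by ring
  have hwx : x < (M.headD "").toList.length := by simpa [gW] using hxW
  rw [e2]
  by_cases h0 : 0 < y
  · have e1 : (y : Int) + (-1) = (((y - 1 : Nat)) : Int) := by omega
    have hx1 := hp3 h0
    rw [e1, PySem.List.pyGetD_natCast, PySem.List.pyGetD_natCast]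
    rw [if_pos ⟨⟨by omega, by omega⟩, by omega, by omega⟩, if_pos h0]
    by_cases hch : (M.getD (y - 1) "").toList.getD x '#' = '#'
    · rw [if_neg (not_not_intro hch), if_pos hch]
    · rw [if_pos hch, if_neg hch]
  · rw [if_neg (fun h => h0 (by omega)), if_neg h0]

-- A's count is at most 1 on the columns beyond the width cap (only the left probe can pass)
theorem cnt_small (M : List String) (y x : Nat) (hxW : ¬ x < gW M) :
    cntA M (y : Int) (x : Int) ≤ 1 := by
  rw [cntA_eq_sum]
  have hwx : ¬ x < (M.headD "").toList.length := by simpa [gW] using hxW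
  have h1 : aT M (y : Int) (x : Int) 0 1 = 0 := by
    unfold aT; rw [if_neg (fun h => hwx (by omega))]
  have h3 : aT M (y : Int) (x : Int) 1 0 = 0 := by
    unfold aT; rw [if_neg (fun h => hwx (by omega))]
  have h4 : aT M (y : Int) (x : Int) (-1) 0 = 0 := by
    unfold aT; rw [if_neg (fun h => hwx (by omega))]
  have h2 := aT_le_one M (y : Int) (x : Int) 0 (-1)
  omega

-- ---------- the degree of an open in-cap cell is exactly A's neighbour count ----------

theorem deg_val (M : List String) (hP : Pre_find_graph_nodes M) (y x : Nat)
    (hy : y < M.length) (hx : x < (M.getD y "").toList.length) (hxW : x < gW M)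
    (hopen : (M.getD y "").toList.getD x '#' ≠ '#') :
    (degDict M).getD ((y : Int), (x : Int)) 0 = cntA M (y : Int) (x : Int) := by
  obtain ⟨hp1, hp2, hp3⟩ := preApply M hP y x hy hx hopen
  -- the degree-table side
  rw [getD_degDict]
  have houter : ∀ y', y' ≠ y → y' ≠ y - 1 → rowSum M ((y : Int), (x : Int)) y' = 0 := by
    intro y' h1 h2
    apply List.sum_eq_zero
    intro z hz
    rw [List.mem_map] at hz
    obtain ⟨x', _, rfl⟩ := hz
    exact contrib_zero M y x y' x' (by omega) (by omega)
  rw [sum_two_support _ y (y - 1) houter M.length, if_pos hy]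
  have hinner : ∀ x', x' ≠ x → x' ≠ x - 1 → contrib M ((y : Int), (x : Int)) y x' = 0 := by
    intro x' h1 h2
    exact contrib_zero M y x y x' (by omega) (by omega)
  rw [rowSum, sum_two_support _ x (x - 1) hinner, if_pos (by omega : x < min (M.getD y "").toList.length (gW M))]
  rw [contrib_self M y x hopen]
  -- A's count side
  rw [cntA_eq_sum, aT_right M y x hp1 hy, aT_down M y x (fun h => hp2 h hxW) hy hxW, aT_left M y x hy hxW,
    aT_up M y x (fun h => hp3 h hxW) hy hxW]
  -- the left contribution
  have hL : (if x - 1 < min (M.getD y "").toList.length (gW M) ∧ x - 1 ≠ x then contrib M ((y : Int), (x : Int)) y (x - 1) else 0)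
      = if 0 < x then (if (M.getD y "").toList.getD (x - 1) '#' = '#' then 0 else 1) else 0 := by
    by_cases h0 : 0 < x
    · rw [if_pos ⟨by omega, by omega⟩, if_pos h0,
        contrib_left M y x (x - 1) (by omega) hxW hx hopen]
    · rw [if_neg (by omega), if_neg h0]
  -- the up contribution
  have hU : (if y - 1 < M.length ∧ y - 1 ≠ y then rowSum M ((y : Int), (x : Int)) (y - 1) else 0)
      = if 0 < y then (if (M.getD (y - 1) "").toList.getD x '#' = '#' then 0 else 1) else 0 := by
    by_cases h0 : 0 < y
    · rw [if_pos ⟨by omega, by omega⟩, if_pos h0]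
      have hup : ∀ x', x' ≠ x → x' ≠ x → contrib M ((y : Int), (x : Int)) (y - 1) x' = 0 := by
        intro x' h1 _
        exact contrib_zero M y x (y - 1) x' (by omega) (by omega)
      rw [rowSum, sum_two_support _ x x hup,
        if_pos (by omega : x < min (M.getD (y - 1) "").toList.length (gW M)),
        if_neg (by omega : ¬ (x < min (M.getD (y - 1) "").toList.length (gW M) ∧ x ≠ x)),
        contrib_up M y x (y - 1) (by omega) hy hx hopen, add_zero]
    · rw [if_neg (by omega), if_neg h0]
  rw [hL, hU]
  ring

-- ---------- loop shapes: both programs emit one row-major filtered list per row ----------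

def condA (M : List String) (y x : Nat) : Bool :=
  decide ((M.getD y "").toList.getD x '#' ≠ '#' ∧ cntA M (y : Int) (x : Int) > 2)

def condB (M : List String) (y x : Nat) : Bool :=
  decide ((M.getD y "").toList.getD x '#' ≠ '#' ∧ (degDict M).getD ((y : Int), (x : Int)) 0 > 2)

def rowNodesA (M : List String) (y : Nat) : List (Int × Int) :=
  ((List.range (M.getD y "").toList.length).filter (condA M y)).map
    (fun x : Nat => ((y : Int), (x : Int)))

def rowNodesB (M : List String) (y : Nat) : List (Int × Int) :=
  ((List.range (min (M.getD y "").toList.length (gW M))).filter (condB M y)).map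
    (fun x : Nat => ((y : Int), (x : Int)))

theorem A_inner (M : List String) (yi : Int) (row : String) (acc : List (Int × Int)) :
    (PySem.List.enumerate row.toList).foldl (fun nodes xc =>
      if xc.2 = '#' then nodes
      else
        let n_count := cntA M yi xc.1
        if n_count > 2 then nodes ++ [(yi, xc.1)] else nodes) acc
    = acc ++ ((PySem.List.enumerate row.toList).filter
        (fun xc => decide (xc.2 ≠ '#' ∧ cntA M yi xc.1 > 2))).map (fun xc => (yi, xc.1)) := by
  rw [PySem.List.foldl_congr_mem (PySem.List.enumerate row.toList) _
    (fun nodes xc => if xc.2 ≠ '#' ∧ cntA M yi xc.1 > 2 then nodes ++ [(yi, xc.1)] else nodes) acc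
    (by intro a xc _
        by_cases h1 : xc.2 = '#' <;> by_cases h2 : cntA M yi xc.1 > 2 <;> simp [h1, h2])]
  exact PySem.List.foldl_append_ite _ _ _ _

theorem enum_char (row : String) :
    PySem.List.enumerate row.toList
      = (List.range row.toList.length).map (fun k : Nat => ((k : Int), row.toList.getD k '#')) := by
  rw [PySem.List.enumerate_eq_map_pyRange row.toList '#',
    show PySem.List.len row.toList = ((row.toList.length : Nat) : Int) from rfl,
    PySem.List.pyRange_zero_natCast, List.map_map]
  simp [Function.comp_def]

theorem enum_grid (M : List String) :
    PySem.List.enumerate M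
      = (List.range M.length).map (fun j : Nat => ((j : Int), M.getD j "")) := by
  rw [PySem.List.enumerate_eq_map_pyRange M "",
    show PySem.List.len M = ((M.length : Nat) : Int) from rfl,
    PySem.List.pyRange_zero_natCast, List.map_map]
  simp [Function.comp_def]

theorem A_char (M : List String) :
    find_graph_nodes M = (List.range M.length).flatMap (rowNodesA M) := by
  unfold find_graph_nodes
  rw [PySem.List.foldl_congr_mem (PySem.List.enumerate M) _
    (fun nodes yrow => nodes ++ ((PySem.List.enumerate yrow.2.toList).filter
        (fun xc => decide (xc.2 ≠ '#' ∧ cntA M yrow.1 xc.1 > 2))).map (fun xc => (yrow.1, xc.1))) []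
    (fun a yrow _ => A_inner M yrow.1 yrow.2 a)]
  rw [PySem.List.foldl_append_eq_flatMap, List.nil_append, enum_grid, List.flatMap_map]
  refine congrArg (fun f => List.flatMap f (List.range M.length)) (funext fun j => ?_)
  simp only
  rw [enum_char (M.getD j ""), List.filter_map, List.map_map]
  unfold rowNodesA condA
  simp [Function.comp_def]

theorem B_char (M : List String) :
    find_graph_nodes_alt M = (List.range M.length).flatMap (rowNodesB M) := by
  simp only [find_graph_nodes_alt, W_eq]
  rw [PySem.List.foldl_congr_mem (List.range M.length) _
    (fun nodes y => nodes ++ rowNodesB M y) []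
    (by intro a y _
        exact PySem.List.foldl_append_ite _ _ _ _)]
  rw [PySem.List.foldl_append_eq_flatMap, List.nil_append]

theorem cell_iff (M : List String) (hP : Pre_find_graph_nodes M) (y : Nat) (hy : y < M.length)
    (x : Nat) :
    (x < (M.getD y "").toList.length ∧ condA M y x = true)
  ↔ (x < min (M.getD y "").toList.length (gW M) ∧ condB M y x = true) := by
  simp only [condA, condB, decide_eq_true_eq]
  constructor
  · rintro ⟨hx, hopen, hcnt⟩
    have hxW : x < gW M := by
      by_contra h
      have := cnt_small M y x h
      omega
    exact ⟨by omega, hopen, by rw [deg_val M hP y x hy hx hxW hopen]; exact hcnt⟩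
  · rintro ⟨hx, hopen, hdeg⟩
    have hx' : x < (M.getD y "").toList.length := by omega
    have hxW : x < gW M := by omega
    exact ⟨hx', hopen, by rw [← deg_val M hP y x hy hx' hxW hopen]; exact hdeg⟩

theorem filter_range_iff (p q : Nat → Bool) (n m : Nat)
    (h : ∀ x : Nat, (x < n ∧ p x = true) ↔ (x < m ∧ q x = true)) :
    (List.range n).filter p = (List.range m).filter q := by
  have h1 : ((List.range n).filter p).Pairwise (· < ·) := List.pairwise_lt_range.filter _
  have h2 : ((List.range m).filter q).Pairwise (· < ·) := List.pairwise_lt_range.filter _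
  have nd1 : ((List.range n).filter p).Nodup := h1.imp Nat.ne_of_lt
  have nd2 : ((List.range m).filter q).Nodup := h2.imp Nat.ne_of_lt
  have hperm : ((List.range n).filter p).Perm ((List.range m).filter q) := by
    rw [List.perm_ext_iff_of_nodup nd1 nd2]
    intro a
    simp only [List.mem_filter, List.mem_range]
    constructor
    · rintro ⟨ha, hp⟩; exact (h a).mp ⟨ha, hp⟩
    · rintro ⟨ha, hq⟩; exact (h a).mpr ⟨ha, hq⟩
  exact hperm.eq_of_pairwise (le := (· < ·))
    (fun a b _ _ hab hba => absurd hba (Nat.lt_asymm hab)) h1 h2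

-- ===== VERDICT (by name: the statement is the Claim_ definition above) =====
theorem find_graph_nodes_spec : Claim_equal_find_graph_nodes := by
  intro M _ hPre
  unfold Spec_find_graph_nodes
  rw [A_char, B_char, List.flatMap_def, List.flatMap_def]
  apply congrArg
  apply List.map_congr_left
  intro y hy
  rw [List.mem_range] at hy
  unfold rowNodesA rowNodesB
  exact congrArg (List.map (fun x : Nat => ((y : Int), (x : Int))))
    (filter_range_iff _ _ _ _ (cell_iff M hPre y hy))
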